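-- pv_equiv track=rewrite | github.com/AlexisGR117/AYED | Programas/Amigos.py | formas
-- ===== SOURCE A (Python) =====
-- def formas(p, opcion, index, c):
--     if c > len(p) - 1:
--         return opcion
--     if len(p[index]) == 1:
--         if p[index][0] not in p[c]:
--             return formas(p, opcion + [p[c]], index, c + 1)
--         return formas(p, opcion, index, c + 1)
--     if len(p[index]) == 2:
--         if p[index][0] not in p[c] and p[index][1] not in p[c]:
--             return formas(p, opcion + [p[c]], index, c + 1)
--         return formas(p, opcion, index, c + 1)
-- ===== SOURCE B (Python) =====
-- def formas(p, opcion, index, c):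
--     if c >= len(p):
--         return list(opcion)
--     members = p[index]
--     result = list(opcion)
--     for c2 in range(c, len(p)):
--         if all(m not in p[c2] for m in members):
--             result.append(p[c2])
--     return result
-- ===== Notes on version B (the rewrite author's own statement) =====
-- stated objective: idiomatic
-- what changed: Replaces the tail recursion that rebuilds opcion+[p[c]] at each step with a single iterative for-loop over range(c, len(p)) appending to one result list, with the two membership branches unified into one all(m not in p[c2] for m in members) test. Pre_ excludes the inputs where A raises IndexError or falls through returning None (len(p[index]) not 1 or 2 with the loop active), on which B naturally returns the filtered list.
-- outside the precondition, e.g. on formas([[1, 2, 3]], [], 0, 0): A returns None, B returns []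
import Mathlib
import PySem

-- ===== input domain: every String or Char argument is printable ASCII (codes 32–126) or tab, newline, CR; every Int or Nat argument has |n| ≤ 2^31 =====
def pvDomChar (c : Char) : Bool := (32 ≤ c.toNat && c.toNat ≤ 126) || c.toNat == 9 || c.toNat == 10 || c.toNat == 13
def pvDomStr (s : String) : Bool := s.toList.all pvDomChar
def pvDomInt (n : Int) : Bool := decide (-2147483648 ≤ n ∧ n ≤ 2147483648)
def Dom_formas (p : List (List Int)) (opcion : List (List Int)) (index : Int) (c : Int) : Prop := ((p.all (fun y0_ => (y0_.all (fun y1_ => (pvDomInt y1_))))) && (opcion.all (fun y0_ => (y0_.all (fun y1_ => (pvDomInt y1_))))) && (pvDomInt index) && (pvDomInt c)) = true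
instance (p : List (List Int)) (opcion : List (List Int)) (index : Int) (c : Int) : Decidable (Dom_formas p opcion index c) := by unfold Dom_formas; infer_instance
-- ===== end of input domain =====

-- B replaces A's tail recursion by one iterative for-loop over range(c, len(p))
-- with a single unified membership test (idiomatic; return value only — neither mutates its arguments).

-- ===== PORT A =====
def formas (p : List (List Int)) (opcion : List (List Int)) (index : Int) (c : Int) : List (List Int) :=
  if _h : c > (p.length : Int) - 1 then opcion
  else
    let pi := PySem.List.pyGetD p index []
    let pc := PySem.List.pyGetD p c []
    if pi.length = 1 then
      if PySem.List.pyGetD pi 0 0 ∉ pc then formas p (opcion ++ [pc]) index (c + 1)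
      else formas p opcion index (c + 1)
    else if pi.length = 2 then
      if PySem.List.pyGetD pi 0 0 ∉ pc ∧ PySem.List.pyGetD pi 1 0 ∉ pc then
        formas p (opcion ++ [pc]) index (c + 1)
      else formas p opcion index (c + 1)
    else []  -- Python A returns None here (no value of the type); excluded by Pre_formas
termination_by ((p.length : Int) - c).toNat
decreasing_by all_goals omega

-- ===== PORT B =====
def formas_alt (p : List (List Int)) (opcion : List (List Int)) (index : Int) (c : Int) : List (List Int) :=
  if (p.length : Int) ≤ c then opcion
  else
    let members := PySem.List.pyGetD p index []
    (PySem.List.pyRange c p.length 1).foldl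
      (fun result c2 =>
        let pc2 := PySem.List.pyGetD p c2 []
        if members.all (fun m => decide (m ∉ pc2)) then result ++ [pc2] else result)
      opcion

-- ===== PRECONDITION & SPEC =====
-- Pre_ excludes exactly the inputs where Python A raises IndexError (index out of range with the
-- loop active, or c < -len(p) with the loop active) or falls through returning None
-- (len(p[index]) not 1 or 2 with the loop active); A returns a list on every other input.
def Pre_formas (p : List (List Int)) (opcion : List (List Int)) (index : Int) (c : Int) : Prop :=
  c > (p.length : Int) - 1 ∨
    (PySem.Raise.InRange p.length index ∧ -(p.length : Int) ≤ c ∧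
      ((PySem.List.pyGetD p index []).length = 1 ∨ (PySem.List.pyGetD p index []).length = 2))
instance (p : List (List Int)) (opcion : List (List Int)) (index : Int) (c : Int) : Decidable (Pre_formas p opcion index c) := by unfold Pre_formas; infer_instance

def pvWitness_formas : List (List Int) × List (List Int) × Int × Int := ([[1], [2], [3]], [], 0, 0)

def Spec_formas (p : List (List Int)) (opcion : List (List Int)) (index : Int) (c : Int) (out : List (List Int)) : Prop := out = formas_alt p opcion index c
instance (p : List (List Int)) (opcion : List (List Int)) (index : Int) (c : Int) (out : List (List Int)) : Decidable (Spec_formas p opcion index c out) := by unfold Spec_formas; infer_instance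

-- ===== CLAIM (what is proved, stated in full; the proofs are below) =====
def Claim_equal_formas : Prop := ∀ (p : List (List Int)) (opcion : List (List Int)) (index : Int) (c : Int), Dom_formas p opcion index c → Pre_formas p opcion index c → Spec_formas p opcion index c (formas p opcion index c)

-- ===== LEMMAS AND PROOFS =====

-- B's loop body, named for the proofs
def pvStep (p : List (List Int)) (members : List Int) (result : List (List Int)) (c2 : Int) : List (List Int) :=
  let pc2 := PySem.List.pyGetD p c2 []
  if members.all (fun m => decide (m ∉ pc2)) then result ++ [pc2] else result

lemma formas_alt_eq_foldl (p : List (List Int)) (opcion : List (List Int)) (index : Int) (c : Int) :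
    formas_alt p opcion index c =
      (PySem.List.pyRange c p.length 1).foldl (pvStep p (PySem.List.pyGetD p index [])) opcion := by
  unfold formas_alt pvStep
  by_cases h : (p.length : Int) ≤ c
  · simp [h, PySem.List.pyRange_one_eq_nil h]
  · simp [h]

lemma main_lemma (p : List (List Int)) (index : Int)
    (hlen : (PySem.List.pyGetD p index []).length = 1 ∨ (PySem.List.pyGetD p index []).length = 2) :
    ∀ (n : Nat) (c : Int) (opcion : List (List Int)), -(p.length : Int) ≤ c →
      n = ((p.length : Int) - c).toNat →
      formas p opcion index c = formas_alt p opcion index c := by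
  intro n
  induction n with
  | zero =>
    intro c opcion _ hn
    have hc : c > (p.length : Int) - 1 := by omega
    rw [formas, formas_alt_eq_foldl, PySem.List.pyRange_one_eq_nil (by omega)]
    simp [hc]
  | succ k ih =>
    intro c opcion hc hn
    have hclt : c < (p.length : Int) := by omega
    have hnle : ¬ c > (p.length : Int) - 1 := by omega
    have hrec : ∀ o : List (List Int),
        formas p o index (c + 1) =
          (PySem.List.pyRange (c + 1) p.length 1).foldl
            (pvStep p (PySem.List.pyGetD p index [])) o := by
      intro o
      rw [← formas_alt_eq_foldl]
      exact ih (c + 1) o (by omega) (by omega)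
    rw [formas_alt_eq_foldl, PySem.List.pyRange_one_cons hclt, List.foldl_cons, formas]
    rcases hlen with h1 | h2
    · obtain ⟨x, hx⟩ : ∃ x, PySem.List.pyGetD p index [] = [x] := by
        cases hpi : PySem.List.pyGetD p index [] with
        | nil => rw [hpi] at h1; simp at h1
        | cons a t =>
          rw [hpi] at h1
          cases t with
          | nil => exact ⟨a, rfl⟩
          | cons b t' => simp at h1
      simp only [dif_neg hnle, hx, List.length_cons, List.length_nil]
      by_cases hmem : x ∈ PySem.List.pyGetD p c []
      · rw [if_pos trivial, if_neg (by simp [PySem.List.pyGetD_zero_cons, hmem]), hrec]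
        simp only [hx]
        congr 1
        simp [pvStep, hmem]
      · rw [if_pos trivial, if_pos (by simp [PySem.List.pyGetD_zero_cons, hmem]), hrec]
        simp only [hx]
        congr 1
        simp [pvStep, hmem]
    · obtain ⟨x, y, hx⟩ : ∃ x y, PySem.List.pyGetD p index [] = [x, y] := by
        cases hpi : PySem.List.pyGetD p index [] with
        | nil => rw [hpi] at h2; simp at h2
        | cons a t =>
          rw [hpi] at h2
          cases t with
          | nil => simp at h2
          | cons b t' =>
            cases t' with
            | nil => exact ⟨a, b, rfl⟩
            | cons d t'' => simp at h2
      simp only [dif_neg hnle, hx, List.length_cons, List.length_nil]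
      have hx0 : PySem.List.pyGetD [x, y] 0 (0:Int) = x := by
        simp [PySem.List.pyGetD_zero_cons]
      have hy0 : PySem.List.pyGetD [x, y] 1 (0:Int) = y := by
        simp [PySem.List.pyGetD_ofNat']
      by_cases hmem : x ∉ PySem.List.pyGetD p c [] ∧ y ∉ PySem.List.pyGetD p c []
      · rw [if_neg (show ¬((0:Nat)+1+1 = 1) by omega), if_pos trivial, if_pos (by rw [hx0, hy0]; exact hmem), hrec]
        simp only [hx]
        congr 1
        simp only [pvStep]
        rw [if_pos (by simp [hmem.1, hmem.2])]
      · rw [if_neg (show ¬((0:Nat)+1+1 = 1) by omega), if_pos trivial, if_neg (by rw [hx0, hy0]; exact hmem), hrec]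
        simp only [hx]
        congr 1
        simp only [pvStep]
        rw [if_neg (by simpa [Decidable.not_and_iff_or_not, not_not] using hmem)]

-- ===== VERDICT (by name: the statement is the Claim_ definition above) =====
theorem formas_spec : Claim_equal_formas := by
  intro p opcion index c _ hpre
  unfold Spec_formas
  rcases hpre with hgt | ⟨hidx, hcge, hlen⟩
  · rw [formas, formas_alt_eq_foldl, PySem.List.pyRange_one_eq_nil (by omega)]
    simp [hgt]
  · exact main_lemma p index hlen _ c opcion hcge rfl
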